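-- pv_equiv track=rewrite | github.com/zhupinli/rakg-wound | utils/entity_type_analyse.py | collect_types
-- ===== SOURCE A (Python) =====
-- from collections import Counter, defaultdict
--
-- def collect_types(json_objs):
--     types = []
--     examples = defaultdict(list)  # save example entity names for each type
--     examples_all = defaultdict(list)
--     for obj in json_objs:
--         ents = obj.get("entities", [])
--         for e in ents:
--             if isinstance(e, dict):
--                 t = e.get("type")
--                 n = e.get("name")
--                 if t:
--                     types.append(t)
--                     examples_all[t].append(n)
--                     if n and len(examples[t]) < 5:
--                         examples[t].append(n)
--     return types, examples, examples_all
-- ===== SOURCE B (Python) =====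
-- from collections import defaultdict
--
-- def collect_types(json_objs):
--     # Pass 1: one scan building only the raw data: the flat type list and the
--     # full per-type name table (no capping logic during the scan).
--     types = []
--     examples_all = defaultdict(list)
--     for obj in json_objs:
--         for e in obj.get("entities", []):
--             if isinstance(e, dict) and e.get("type"):
--                 types.append(e["type"])
--                 examples_all[e["type"]].append(e.get("name"))
--     # Pass 2: derive the capped example table from the full table.
--     examples = defaultdict(list)
--     for t, names in examples_all.items():
--         sample = [n for n in names if n][:5]
--         if sample:
--             examples[t] = sample
--     return types, examples, examples_all
-- ===== Notes on version B (the rewrite author's own statement) =====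
-- stated objective: alternative
-- what changed: A maintains all three results in one interleaved scan with the 5-cap and truthiness of the name checked inside the loop; B's scan builds only the raw data (types list and the full per-type name table examples_all) and the capped examples table is derived afterwards in a second pass over examples_all.items() by filtering truthy names and taking the first 5.
import Mathlib
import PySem

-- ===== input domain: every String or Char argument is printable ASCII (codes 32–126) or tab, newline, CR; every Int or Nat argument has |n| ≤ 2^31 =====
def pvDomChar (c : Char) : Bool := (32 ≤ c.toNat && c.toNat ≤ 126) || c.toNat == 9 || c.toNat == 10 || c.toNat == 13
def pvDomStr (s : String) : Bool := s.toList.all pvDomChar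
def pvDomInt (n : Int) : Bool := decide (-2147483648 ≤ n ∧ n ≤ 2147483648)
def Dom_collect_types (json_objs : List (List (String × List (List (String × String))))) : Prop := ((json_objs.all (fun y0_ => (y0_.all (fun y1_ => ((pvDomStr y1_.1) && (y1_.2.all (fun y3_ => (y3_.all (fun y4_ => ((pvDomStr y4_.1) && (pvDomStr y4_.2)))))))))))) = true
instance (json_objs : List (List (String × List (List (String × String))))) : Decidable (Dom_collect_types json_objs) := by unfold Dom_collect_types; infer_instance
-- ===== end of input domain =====

-- B's scan builds only the raw data (types and the full per-type name table); the capped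
-- examples table is derived from examples_all in a second pass instead of during the scan.
-- Pre_ excludes entities with a truthy "type" but missing/falsy "name": a missing name puts
-- None (not a String) into examples_all, and a falsy name makes the defaultdict key-creation
-- order of examples an accident of the scan that B's insertion-ordered derivation need not share.


-- ===== PORT A =====
-- state: (types, examples, examples_all); Python's None name is excluded by Pre_, so
-- e.get("name") is ported as (get? "name").getD "" (exact on Pre_).
def pvStateT : Type := List String × PySem.Dict String (List String) × PySem.Dict String (List String)

def pvStepA (st : pvStateT) (e : List (String × String)) : pvStateT :=
  let d := PySem.Dict.mk e
  match d.get? "type" with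
  | none => st
  | some t =>
    if t = "" then st
    else
      let n := ((d.get? "name").getD "")
      let types := st.1 ++ [t]
      let examples_all := st.2.2.modify t [] (· ++ [n])
      -- defaultdict access examples[t] creates the key only when n is truthy; the key is
      -- then below the cap exactly when it gets an element appended, so net effect is:
      let examples := if n ≠ "" ∧ (st.2.1.getD t []).length < 5
                      then st.2.1.modify t [] (· ++ [n]) else st.2.1
      (types, examples, examples_all)

def collect_types (json_objs : List (List (String × List (List (String × String))))) : List String × (List (String × List String)) × (List (String × List String)) :=
  let st := json_objs.foldl (fun st obj =>
    (((PySem.Dict.mk obj).get? "entities").getD []).foldl pvStepA st)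
    (([] : List String), (PySem.Dict.empty : PySem.Dict String (List String)), (PySem.Dict.empty : PySem.Dict String (List String)))
  (st.1, st.2.1.items, st.2.2.items)

-- ===== PORT B =====
-- pass 1: only types and the full table examples_all
def pvStepB (st : List String × PySem.Dict String (List String)) (e : List (String × String)) :
    List String × PySem.Dict String (List String) :=
  let d := PySem.Dict.mk e
  match d.get? "type" with
  | none => st
  | some t =>
    if t = "" then st
    else (st.1 ++ [t], st.2.modify t [] (· ++ [((d.get? "name").getD "")]))

def collect_types_alt (json_objs : List (List (String × List (List (String × String))))) : List String × (List (String × List String)) × (List (String × List String)) :=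
  let st := json_objs.foldl (fun st obj =>
    (((PySem.Dict.mk obj).get? "entities").getD []).foldl pvStepB st)
    (([] : List String), (PySem.Dict.empty : PySem.Dict String (List String)))
  -- pass 2: derive the capped table from the full one
  let examples := st.2.items.foldl (fun d p =>
    let sample := (p.2.filter (fun n => decide (n ≠ ""))).take 5
    if sample = [] then d else d.insert p.1 sample)
    (PySem.Dict.empty : PySem.Dict String (List String))
  (st.1, examples.items, st.2.items)

-- ===== PRECONDITION & SPEC =====
-- Pre_ excludes inputs where some entity has a truthy "type" but a missing or empty "name":
-- a missing name makes A return the non-String value None inside examples_all, and an empty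
-- name can make the key insertion order of A's examples (a defaultdict-creation-order
-- accident) differ from B's examples_all-derived order.
def Pre_collect_types (json_objs : List (List (String × List (List (String × String))))) : Prop :=
  ∀ obj ∈ json_objs, ∀ e ∈ ((PySem.Dict.mk obj).get? "entities").getD [],
    ((PySem.Dict.mk e).get? "type").getD "" ≠ "" → ((PySem.Dict.mk e).get? "name").getD "" ≠ ""
instance (json_objs : List (List (String × List (List (String × String))))) : Decidable (Pre_collect_types json_objs) := by unfold Pre_collect_types; infer_instance

def pvWitness_collect_types : (List (List (String × List (List (String × String))))) :=
  [[("entities", [[("type", "person"), ("name", "Ann")], [("type", "city"), ("name", "Rome")]])]]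

def Spec_collect_types (json_objs : List (List (String × List (List (String × String))))) (out : List String × (List (String × List String)) × (List (String × List String))) : Prop := out = collect_types_alt json_objs
instance (json_objs : List (List (String × List (List (String × String))))) (out : List String × (List (String × List String)) × (List (String × List String))) : Decidable (Spec_collect_types json_objs out) := by unfold Spec_collect_types; infer_instance

-- ===== CLAIM (what is proved, stated in full; the proofs are below) =====
def Claim_equal_collect_types : Prop := ∀ (json_objs : List (List (String × List (List (String × String))))), Dom_collect_types json_objs → Pre_collect_types json_objs → Spec_collect_types json_objs (collect_types json_objs)

-- ===== LEMMAS AND PROOFS =====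

-- the (type, name) pair an entity contributes, if any (proof-side abstraction of both scans)
def pvPairOf (e : List (String × String)) : Option (String × String) :=
  let d := PySem.Dict.mk e
  match d.get? "type" with
  | none => none
  | some t => if t = "" then none else some (t, (d.get? "name").getD "")

def pvPairs (json_objs : List (List (String × List (List (String × String))))) : List (String × String) :=
  json_objs.flatMap (fun obj =>
    (((PySem.Dict.mk obj).get? "entities").getD []).filterMap pvPairOf)

-- A's per-pair step acting on its whole state.
def pvStepP (st : pvStateT) (p : String × String) : pvStateT :=
  (st.1 ++ [p.1],
   (if p.2 ≠ "" ∧ (st.2.1.getD p.1 []).length < 5 then st.2.1.modify p.1 [] (· ++ [p.2]) else st.2.1),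
   st.2.2.modify p.1 [] (· ++ [p.2]))

theorem pvStepA_eq (st : pvStateT) (e : List (String × String)) :
    pvStepA st e = match pvPairOf e with
                   | none => st
                   | some p => pvStepP st p := by
  unfold pvStepA pvPairOf pvStepP
  cases h : (PySem.Dict.mk e).get? "type" with
  | none => simp [h]
  | some t => by_cases ht : t = "" <;> simp [h, ht]

theorem foldl_stepA_eq_filterMap (ents : List (List (String × String))) (st : pvStateT) :
    ents.foldl pvStepA st = (ents.filterMap pvPairOf).foldl pvStepP st := by
  induction ents generalizing st with
  | nil => rfl
  | cons e rest ih =>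
    rw [List.foldl_cons, pvStepA_eq]
    cases h : pvPairOf e with
    | none => simp [h, ih]
    | some p => simp [h, List.foldl_cons, ih]

theorem foldl_objs_eq_pairs (json_objs : List (List (String × List (List (String × String))))) (st : pvStateT) :
    json_objs.foldl (fun st obj => (((PySem.Dict.mk obj).get? "entities").getD []).foldl pvStepA st) st
      = (pvPairs json_objs).foldl pvStepP st := by
  induction json_objs generalizing st with
  | nil => rfl
  | cons obj rest ih =>
    simp only [pvPairs, List.flatMap_cons, List.foldl_cons, List.foldl_append] at ih ⊢
    rw [ih, foldl_stepA_eq_filterMap]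

-- B's pass-1 per-pair step.
def pvStepQ (st : List String × PySem.Dict String (List String)) (p : String × String) :
    List String × PySem.Dict String (List String) :=
  (st.1 ++ [p.1], st.2.modify p.1 [] (· ++ [p.2]))

theorem pvStepB_eq (st : List String × PySem.Dict String (List String)) (e : List (String × String)) :
    pvStepB st e = match pvPairOf e with
                   | none => st
                   | some p => pvStepQ st p := by
  unfold pvStepB pvPairOf pvStepQ
  cases h : (PySem.Dict.mk e).get? "type" with
  | none => simp [h]
  | some t => by_cases ht : t = "" <;> simp [h, ht]

theorem foldl_stepB_eq_filterMap (ents : List (List (String × String))) (st : List String × PySem.Dict String (List String)) :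
    ents.foldl pvStepB st = (ents.filterMap pvPairOf).foldl pvStepQ st := by
  induction ents generalizing st with
  | nil => rfl
  | cons e rest ih =>
    rw [List.foldl_cons, pvStepB_eq]
    cases h : pvPairOf e with
    | none => simp [h, ih]
    | some p => simp [h, List.foldl_cons, ih]

theorem foldl_objs_eq_pairs_B (json_objs : List (List (String × List (List (String × String))))) (st : List String × PySem.Dict String (List String)) :
    json_objs.foldl (fun st obj => (((PySem.Dict.mk obj).get? "entities").getD []).foldl pvStepB st) st
      = (pvPairs json_objs).foldl pvStepQ st := by
  induction json_objs generalizing st with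
  | nil => rfl
  | cons obj rest ih =>
    simp only [pvPairs, List.flatMap_cons, List.foldl_cons, List.foldl_append] at ih ⊢
    rw [ih, foldl_stepB_eq_filterMap]

-- splitting A's combined step into three independent folds
theorem foldl_stepP_split (pairs : List (String × String)) (st : pvStateT) :
    pairs.foldl pvStepP st =
      (st.1 ++ pairs.map (·.1),
       (pairs.filter (fun p => decide (p.2 ≠ ""))).foldl
         (fun d p => if (d.getD p.1 []).length < 5 then d.modify p.1 [] (· ++ [p.2]) else d) st.2.1,
       pairs.foldl (fun d p => d.modify p.1 [] (· ++ [p.2])) st.2.2) := by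
  induction pairs generalizing st with
  | nil => simp
  | cons p rest ih =>
    rw [List.foldl_cons, ih]
    by_cases hn : p.2 = "" <;>
      simp [pvStepP, hn, List.foldl_cons]

-- splitting B's pass-1 step into two independent folds
theorem foldl_stepQ_split (pairs : List (String × String)) (st : List String × PySem.Dict String (List String)) :
    pairs.foldl pvStepQ st =
      (st.1 ++ pairs.map (·.1),
       pairs.foldl (fun d p => d.modify p.1 [] (· ++ [p.2])) st.2) := by
  induction pairs generalizing st with
  | nil => simp
  | cons p rest ih => rw [List.foldl_cons, ih]; simp [pvStepQ, List.foldl_cons]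

-- on Pre_, every collected pair has a truthy name
theorem pairs_snd_ne (json_objs : List (List (String × List (List (String × String)))))
    (hpre : Pre_collect_types json_objs) : ∀ p ∈ pvPairs json_objs, p.2 ≠ "" := by
  intro p hp
  simp only [pvPairs, List.mem_flatMap, List.mem_filterMap] at hp
  obtain ⟨obj, hobj, e, he, hpe⟩ := hp
  unfold pvPairOf at hpe
  cases h : (PySem.Dict.mk e).get? "type" with
  | none => simp [h] at hpe
  | some t =>
    by_cases ht : t = ""
    · simp [h, ht] at hpe
    · simp [h, ht] at hpe
      have := hpre obj hobj e he (by simp [h, ht])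
      simpa [← hpe] using this

-- the cap-during-scan fold keeps exactly the first 5 entries of each value of the full fold
theorem capfold_inv (pairs : List (String × String)) (c e : PySem.Dict String (List String))
    (hk : c.keys = e.keys) (hnd : e.keys.Nodup)
    (hv : ∀ k, c.getD k [] = (e.getD k []).take 5) :
    (pairs.foldl (fun d p => if (d.getD p.1 []).length < 5 then d.modify p.1 [] (· ++ [p.2]) else d) c).keys
      = (pairs.foldl (fun d p => d.modify p.1 [] (· ++ [p.2])) e).keys
    ∧ (pairs.foldl (fun d p => d.modify p.1 [] (· ++ [p.2])) e).keys.Nodup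
    ∧ ∀ k, (pairs.foldl (fun d p => if (d.getD p.1 []).length < 5 then d.modify p.1 [] (· ++ [p.2]) else d) c).getD k []
          = ((pairs.foldl (fun d p => d.modify p.1 [] (· ++ [p.2])) e).getD k []).take 5 := by
  induction pairs generalizing c e with
  | nil => exact ⟨hk, hnd, hv⟩
  | cons p rest ih =>
    simp only [List.foldl_cons]
    have hcontains : c.contains p.1 = e.contains p.1 := by
      rw [PySem.Dict.contains_eq_decide_mem_keys, PySem.Dict.contains_eq_decide_mem_keys, hk]
    have hL := hv p.1
    by_cases h5 : (c.getD p.1 []).length < 5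
    · -- below the cap: both sides append
      rw [if_pos h5]
      refine ih _ _ ?_ ?_ ?_
      · by_cases hec : e.contains p.1 = true
        · rw [PySem.Dict.keys_modify, PySem.Dict.keys_modify,
              PySem.Dict.keys_insert_of_contains _ _ (hcontains.trans hec),
              PySem.Dict.keys_insert_of_contains _ _ hec, hk]
        · have hec' : e.contains p.1 = false := by revert hec; cases e.contains p.1 <;> simp
          rw [PySem.Dict.keys_modify, PySem.Dict.keys_modify,
              PySem.Dict.keys_insert_of_not_contains _ _ (hcontains.trans hec'),
              PySem.Dict.keys_insert_of_not_contains _ _ hec', hk]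
      · rw [PySem.Dict.keys_modify]
        exact PySem.Dict.nodup_keys_insert _ _ _ hnd
      · intro k
        have hlen : (e.getD p.1 []).length < 5 := by
          have := congrArg List.length hL; simp [List.length_take] at this; omega
        rw [PySem.Dict.getD_modify, PySem.Dict.getD_modify]
        by_cases hkp : k = p.1
        · simp only [if_pos hkp]
          rw [hL, List.take_of_length_le (by omega), List.take_of_length_le (by simp; omega)]
        · simp only [if_neg hkp]; exact hv k
    · -- at the cap: A keeps c, the full fold still appends
      rw [if_neg h5]
      have hlen : 5 ≤ (e.getD p.1 []).length := by
        have := congrArg List.length hL; simp [List.length_take] at this; omega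
      have hec : e.contains p.1 = true := by
        cases hq : e.contains p.1
        · have := PySem.Dict.getD_of_not_contains (d := e) (k := p.1) (d0 := ([] : List String)) hq
          rw [this] at hlen; simp at hlen
        · rfl
      refine ih _ _ ?_ ?_ ?_
      · rw [PySem.Dict.keys_modify, PySem.Dict.keys_insert_of_contains _ _ hec, hk]
      · rw [PySem.Dict.keys_modify]
        exact PySem.Dict.nodup_keys_insert _ _ _ hnd
      · intro k
        rw [PySem.Dict.getD_modify]
        by_cases hkp : k = p.1
        · simp only [if_pos hkp]
          rw [hkp, hL, List.take_append_of_le_length hlen]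
        · simp only [if_neg hkp]; exact hv k

-- deriving the capped table from the full table equals capping during the scan
theorem cap_eq_post (pairs : List (String × String)) (hne : ∀ p ∈ pairs, p.2 ≠ "") :
    (pairs.foldl (fun d p => if (d.getD p.1 []).length < 5 then d.modify p.1 [] (· ++ [p.2]) else d)
      (PySem.Dict.empty : PySem.Dict String (List String))).items
  = ((pairs.foldl (fun d p => d.modify p.1 [] (· ++ [p.2])) (PySem.Dict.empty : PySem.Dict String (List String))).items.foldl
      (fun d p =>
        let sample := (p.2.filter (fun n => decide (n ≠ ""))).take 5
        if sample = [] then d else d.insert p.1 sample)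
      (PySem.Dict.empty : PySem.Dict String (List String))).items := by
  set E := pairs.foldl (fun d p => d.modify p.1 [] (· ++ [p.2])) (PySem.Dict.empty : PySem.Dict String (List String)) with hE
  have hEnodup : E.keys.Nodup := by
    rw [hE]
    exact PySem.Dict.nodup_keys_foldl_modify_key pairs (fun p => p.1) [] (fun _ p => (· ++ [p.2])) _
      PySem.Dict.nodup_keys_empty
  have hval : ∀ k, E.getD k [] = (pairs.filter (fun p => p.1 == k)).map (fun x => x.2) := by
    intro k
    rw [hE, PySem.Dict.getD_foldl_modify_append]
    simp [PySem.Dict.getD_empty]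
  -- every stored name list has only truthy names and is nonempty
  have hitem : ∀ q ∈ E.items, q.2.filter (fun n => decide (n ≠ "")) = q.2 ∧ q.2 ≠ [] := by
    intro q hq
    obtain ⟨k, ns⟩ := q
    have hns : ns = E.getD k [] := (PySem.Dict.getD_of_mem_items E hq hEnodup []).symm
    constructor
    · apply List.filter_eq_self.mpr
      intro n hn
      rw [hns, hval k] at hn
      obtain ⟨p, hp, hpn⟩ := List.mem_map.1 hn
      have := hne p (List.mem_of_mem_filter hp)
      simp [← hpn, this]
    · have hk : k ∈ E.keys := PySem.Dict.mem_keys_of_mem_items E hq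
      rw [hE, PySem.Dict.keys_foldl_modify_key pairs (fun p => p.1) [] (fun _ p => (· ++ [p.2])),
          PySem.Dict.keys_empty, PySem.Set.update_nil_left] at hk
      have hk' := (PySem.Set.mem_ofList _ _).1 hk
      obtain ⟨p, hp, hpk⟩ := List.mem_map.1 hk'
      intro hnil
      rw [hns, hval k] at hnil
      simp only [List.map_eq_nil_iff, List.filter_eq_nil_iff] at hnil
      exact hnil p hp (by simp [hpk])
  -- drop the emptiness guard in pass 2 and run the fresh-key insert loop
  have hpost : ((E.items).foldl (fun d p =>
        let sample := (p.2.filter (fun n => decide (n ≠ ""))).take 5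
        if sample = [] then d else d.insert p.1 sample)
      (PySem.Dict.empty : PySem.Dict String (List String))).items
      = E.items.map (fun q => (q.1, q.2.take 5)) := by
    rw [PySem.List.foldl_congr_mem E.items _
      (fun d q => d.insert q.1 ((q.2.filter (fun n => decide (n ≠ ""))).take 5)) _ ?_]
    · rw [PySem.Dict.items_foldl_insert_fresh E.items (fun q => q.1)
        (fun q => (q.2.filter (fun n => decide (n ≠ ""))).take 5) _ ?_ ?_]
      · have hemp : (PySem.Dict.empty : PySem.Dict String (List String)).items = [] := rfl
        rw [hemp, List.nil_append]
        apply List.map_congr_left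
        intro q hq
        rw [(hitem q hq).1]
      · intro a _; exact PySem.Dict.contains_empty _
      · simpa [PySem.Dict.keys] using hEnodup
    · intro acc q hq
      have hs : (q.2.filter (fun n => decide (n ≠ ""))).take 5 ≠ [] := by
        rw [(hitem q hq).1]
        simp [List.take_eq_nil_iff, (hitem q hq).2]
      simp only [if_neg hs]
  -- the capped scan equals the same map, via the invariant
  obtain ⟨hk', hnd', hv'⟩ := capfold_inv pairs
    (PySem.Dict.empty : PySem.Dict String (List String)) (PySem.Dict.empty : PySem.Dict String (List String))
    rfl PySem.Dict.nodup_keys_empty (fun k => by simp [PySem.Dict.getD_empty])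
  rw [hpost, PySem.Dict.items_eq_map_keys _ (hk' ▸ hnd' : _) ([] : List String),
      PySem.Dict.items_eq_map_keys E hEnodup ([] : List String), List.map_map, hk']
  apply List.map_congr_left
  intro k _
  simp [hv' k, hE]

-- ===== VERDICT (by name: the statement is the Claim_ definition above) =====
theorem collect_types_spec : Claim_equal_collect_types := by
  intro json_objs _ hpre
  unfold Spec_collect_types collect_types collect_types_alt
  rw [foldl_objs_eq_pairs, foldl_objs_eq_pairs_B, foldl_stepP_split, foldl_stepQ_split]
  have hfilt : (pvPairs json_objs).filter (fun p => decide (p.2 ≠ "")) = pvPairs json_objs :=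
    List.filter_eq_self.mpr (fun p hp => by simp [pairs_snd_ne json_objs hpre p hp])
  rw [hfilt]
  exact congrArg (fun l => ((([] : List String) ++ (pvPairs json_objs).map (fun p => p.1)), l,
    ((pvPairs json_objs).foldl (fun d p => d.modify p.1 [] (· ++ [p.2])) PySem.Dict.empty).items))
    (cap_eq_post (pvPairs json_objs) (pairs_snd_ne json_objs hpre))
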